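-- pv_equiv track=rewrite | github.com/sintridomargalef/SPeak-PnL | analizar_ep.py | stats_rangos
-- ===== SOURCE A (Python) =====
-- def stats_rangos(ops: list) -> dict:
--     """Calcula estadísticas por rango."""
--     stats = {}
--     for o in ops:
--         r = o.get('rango', '?')
--         if r not in stats:
--             stats[r] = {'total': 0, 'aciertos': 0, 'skips': 0, 'dir': 0, 'inv': 0}
--         stats[r]['total'] += 1
--         if o['acierto']:
--             stats[r]['aciertos'] += 1
--         m = o.get('modo', '')
--         if m == 'SKIP':
--             stats[r]['skips'] += 1
--         elif m == 'DIRECTO':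
--             stats[r]['dir'] += 1
--         elif m == 'INVERSO':
--             stats[r]['inv'] += 1
--     return stats
-- ===== SOURCE B (Python) =====
-- def stats_rangos(ops: list) -> dict:
--     """Calcula estadísticas por rango."""
--     groups = {}
--     for o in ops:
--         groups.setdefault(o.get('rango', '?'), []).append(o)
--     out = {}
--     for r, g in groups.items():
--         out[r] = {
--             'total': len(g),
--             'aciertos': sum(1 for o in g if o['acierto']),
--             'skips': sum(1 for o in g if o.get('modo', '') == 'SKIP'),
--             'dir': sum(1 for o in g if o.get('modo', '') == 'DIRECTO'),
--             'inv': sum(1 for o in g if o.get('modo', '') == 'INVERSO'),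
--         }
--     return out
-- ===== Notes on version B (the rewrite author's own statement) =====
-- stated objective: alternative
-- what changed: Replaces A's single pass of incremental per-op record updates on a dict-of-dicts with two explicit phases: first group the ops by their range (setdefault/append in first-appearance order), then compute each range's record at once by counting over its group.
import Mathlib
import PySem

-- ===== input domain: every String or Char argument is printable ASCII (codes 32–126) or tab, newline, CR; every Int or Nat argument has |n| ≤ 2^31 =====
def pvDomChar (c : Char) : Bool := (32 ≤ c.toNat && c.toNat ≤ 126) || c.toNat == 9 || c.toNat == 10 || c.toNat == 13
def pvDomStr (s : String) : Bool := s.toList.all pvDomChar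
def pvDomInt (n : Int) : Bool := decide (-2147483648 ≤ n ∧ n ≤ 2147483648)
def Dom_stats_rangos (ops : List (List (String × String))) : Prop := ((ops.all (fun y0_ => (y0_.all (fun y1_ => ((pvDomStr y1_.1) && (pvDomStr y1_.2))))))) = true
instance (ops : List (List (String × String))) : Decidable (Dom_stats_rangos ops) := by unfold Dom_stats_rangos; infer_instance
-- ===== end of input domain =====

-- B replaces A's incremental per-op record updates with an explicit group-by-range phase
-- followed by a counting phase over each group (alternative decomposition, same cost).


-- ===== PORT A =====
-- o.get('rango', '?') (dict lookup = first match in the association list)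
def pvKey (o : List (String × String)) : String := (List.lookup "rango" o).getD "?"

-- the fresh record {'total': 0, 'aciertos': 0, 'skips': 0, 'dir': 0, 'inv': 0}
def pvFresh : PySem.Dict String Int :=
  PySem.Dict.mk [("total", 0), ("aciertos", 0), ("skips", 0), ("dir", 0), ("inv", 0)]

-- the in-place updates A performs on stats[r] for one op o, in A's branch order
-- (o['acierto'] is a string; Python truthiness = non-empty; inside Pre_ the key is
-- always present, so the getD default is never consulted for 'acierto')
def pvUpd (o : List (String × String)) (d : PySem.Dict String Int) : PySem.Dict String Int :=
  let d := d.modify "total" 0 (· + 1)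
  let d := if ((List.lookup "acierto" o).getD "") ≠ "" then d.modify "aciertos" 0 (· + 1) else d
  let m := (List.lookup "modo" o).getD ""
  if m = "SKIP" then d.modify "skips" 0 (· + 1)
  else if m = "DIRECTO" then d.modify "dir" 0 (· + 1)
  else if m = "INVERSO" then d.modify "inv" 0 (· + 1)
  else d

def stats_rangos (ops : List (List (String × String))) : List (String × List (String × Int)) :=
  let stats := ops.foldl (fun stats o =>
    let r := pvKey o
    let stats := if stats.contains r then stats else stats.insert r pvFresh
    stats.modify r pvFresh (pvUpd o)) PySem.Dict.empty
  stats.items.map (fun p => (p.1, p.2.items))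

-- ===== PORT B =====
-- the record B computes at once from one range's whole group of ops
def pvRec (grp : List (List (String × String))) : List (String × Int) :=
  [("total", (grp.length : Int)),
   ("aciertos", (grp.countP (fun o => (List.lookup "acierto" o).getD "" != "") : Int)),
   ("skips", (grp.countP (fun o => (List.lookup "modo" o).getD "" == "SKIP") : Int)),
   ("dir", (grp.countP (fun o => (List.lookup "modo" o).getD "" == "DIRECTO") : Int)),
   ("inv", (grp.countP (fun o => (List.lookup "modo" o).getD "" == "INVERSO") : Int))]

def stats_rangos_alt (ops : List (List (String × String))) : List (String × List (String × Int)) :=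
  let groups := ops.foldl (fun g o => g.modify (pvKey o) [] (· ++ [o])) PySem.Dict.empty
  groups.items.map (fun p => (p.1, pvRec p.2))

-- ===== PRECONDITION & SPEC =====
-- Pre_ excludes exactly the inputs on which the Python A raises KeyError: an op dict
-- without the key 'acierto' (the Python B dereferences o['acierto'] and raises there too).
def Pre_stats_rangos (ops : List (List (String × String))) : Prop :=
  (ops.all (fun o => o.any (fun p => p.1 == "acierto"))) = true
instance (ops : List (List (String × String))) : Decidable (Pre_stats_rangos ops) := by
  unfold Pre_stats_rangos; infer_instance
def pvWitness_stats_rangos : (List (List (String × String))) :=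
  [[("acierto", "1"), ("rango", "a"), ("modo", "SKIP")], [("acierto", "")]]

def Spec_stats_rangos (ops : List (List (String × String))) (out : List (String × List (String × Int))) : Prop := out = stats_rangos_alt ops
instance (ops : List (List (String × String))) (out : List (String × List (String × Int))) : Decidable (Spec_stats_rangos ops out) := by unfold Spec_stats_rangos; infer_instance

-- ===== CLAIM (what is proved, stated in full; the proofs are below) =====
def Claim_equal_stats_rangos : Prop := ∀ (ops : List (List (String × String))), Dom_stats_rangos ops → Pre_stats_rangos ops → Spec_stats_rangos ops (stats_rangos ops)

-- ===== LEMMAS AND PROOFS =====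

-- the simulation map: B's grouping dict determines A's stats dict
def pvMapF (g : PySem.Dict String (List (List (String × String)))) :
    PySem.Dict String (PySem.Dict String Int) :=
  PySem.Dict.mk (g.items.map (fun p => (p.1, PySem.Dict.mk (pvRec p.2))))

-- central fact: applying A's per-op updates to a group's record gives the extended group's record
theorem pvUpd_pvRec (o : List (String × String)) (grp : List (List (String × String))) :
    pvUpd o (PySem.Dict.mk (pvRec grp)) = PySem.Dict.mk (pvRec (grp ++ [o])) := by
  unfold pvUpd
  by_cases h1 : ((List.lookup "acierto" o).getD "") = "" <;>
  by_cases hs : (List.lookup "modo" o).getD "" = "SKIP" <;>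
  by_cases hd : (List.lookup "modo" o).getD "" = "DIRECTO" <;>
  by_cases hi : (List.lookup "modo" o).getD "" = "INVERSO" <;>
  simp_all [pvRec, PySem.Dict.modify, PySem.Dict.insert, PySem.Dict.contains,
    PySem.Dict.getD, PySem.Dict.get?, List.countP_append]

theorem pvFind_map {nu1 nu2 : Type} (h : nu1 → nu2) (l : List (String × nu1)) (r : String) :
    (l.map (fun p => (p.1, h p.2))).find? (fun p => p.1 == r)
      = (l.find? (fun p => p.1 == r)).map (fun p => (p.1, h p.2)) := by
  induction l with
  | nil => rfl
  | cons x t ih => by_cases hx : x.1 = r <;> simp [hx, ih]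

theorem pvReplace_map {nu1 nu2 : Type} (h : nu1 → nu2) (l : List (String × nu1)) (r : String) (v : nu1) :
    (l.map (fun p => (p.1, h p.2))).map (fun p => if p.1 == r then (r, h v) else p)
      = (l.map (fun p => if p.1 == r then (r, v) else p)).map (fun p => (p.1, h p.2)) := by
  induction l with
  | nil => rfl
  | cons x t ih =>
    simp only [List.map_cons, ih]
    by_cases hx : x.1 = r <;> simp [hx]

theorem pvFind_none {nu : Type} (l : List (String × nu)) (r : String)
    (h : l.any (fun p => p.1 == r) = false) :
    l.find? (fun p => p.1 == r) = none := by
  rw [List.find?_eq_none]; intro x hx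
  simp only [List.any_eq_false] at h
  simpa using h x hx

theorem pvReplace_none {nu : Type} (l : List (String × nu)) (r : String) (z : String × nu)
    (h : l.any (fun p => p.1 == r) = false) :
    l.map (fun p => if p.1 == r then z else p) = l := by
  induction l with
  | nil => rfl
  | cons x t ih =>
    simp only [List.any_cons, Bool.or_eq_false_iff] at h
    simp only [List.map_cons, h.1, ih h.2, Bool.false_eq_true, if_false]

theorem pvFresh_eq : pvFresh = PySem.Dict.mk (pvRec []) := by
  simp [pvFresh, pvRec]

theorem pvAny_map (l : List (String × List (List (String × String)))) (r : String) :
    (l.map (fun p => (p.1, PySem.Dict.mk (pvRec p.2)))).any (fun p => p.1 == r)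
      = l.any (fun p => p.1 == r) := by
  simp only [List.any_map]; rfl

-- one step of A's loop simulates one step of B's grouping loop
theorem pvStep (g : PySem.Dict String (List (List (String × String)))) (o : List (String × String)) :
    (let r := pvKey o
     let s := if (pvMapF g).contains r then pvMapF g else (pvMapF g).insert r pvFresh
     s.modify r pvFresh (pvUpd o)) = pvMapF (g.modify (pvKey o) [] (· ++ [o])) := by
  cases g with
  | mk l =>
  simp only [pvMapF, PySem.Dict.modify, PySem.Dict.insert, PySem.Dict.contains,
    PySem.Dict.getD, PySem.Dict.get?, pvAny_map]
  by_cases hany : l.any (fun p => p.1 == pvKey o) = true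
  · obtain ⟨p, hp⟩ : ∃ p, l.find? (fun p => p.1 == pvKey o) = some p :=
      Option.isSome_iff_exists.mp
        (List.find?_isSome.mpr (by simpa [List.any_eq_true] using hany))
    simp only [hany, if_true, pvAny_map, pvFind_map (fun grp => PySem.Dict.mk (pvRec grp)), hp,
      Option.map_some, Option.getD_some, pvUpd_pvRec,
      pvReplace_map (fun grp => PySem.Dict.mk (pvRec grp))]
  · simp only [Bool.not_eq_true] at hany
    simp only [hany, Bool.false_eq_true, if_false, List.any_append, pvAny_map,
      List.find?_append, pvFind_none _ _ hany, List.map_append,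
      pvReplace_none (h := hany), List.map_cons, List.map_nil]
    have hanym : ((l.map (fun p => (p.1, PySem.Dict.mk (pvRec p.2)))).any (fun p => p.1 == pvKey o)) = false := by
      rw [pvAny_map]; exact hany
    rw [pvFresh_eq]
    simp [pvFind_none _ _ hanym, pvUpd_pvRec]
    intro a b hab ha
    exfalso
    simp only [List.any_eq_false] at hany
    exact absurd ha (by simpa using hany (a, b) hab)

-- loop invariant: A's fold from a simulated state equals the simulation of B's fold
theorem pvInv (ops : List (List (String × String)))
    (g : PySem.Dict String (List (List (String × String)))) :
    ops.foldl (fun stats o =>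
      let r := pvKey o
      let stats := if stats.contains r then stats else stats.insert r pvFresh
      stats.modify r pvFresh (pvUpd o)) (pvMapF g)
    = pvMapF (ops.foldl (fun g o => g.modify (pvKey o) [] (· ++ [o])) g) := by
  induction ops generalizing g with
  | nil => rfl
  | cons o t ih =>
    simp only [List.foldl_cons]
    rw [pvStep g o]
    exact ih _

-- ===== VERDICT (by name: the statement is the Claim_ definition above) =====
theorem stats_rangos_spec : Claim_equal_stats_rangos := by
  intro ops _ _
  unfold Spec_stats_rangos stats_rangos stats_rangos_alt
  rw [show (PySem.Dict.empty : PySem.Dict String (PySem.Dict String Int))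
        = pvMapF PySem.Dict.empty from rfl, pvInv]
  simp [pvMapF, List.map_map, Function.comp]
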